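-- pv_equiv track=rewrite | github.com/Danh-Lan/automate-boring-stuff | Chapter4/comma_code.py | listItem
-- ===== SOURCE A (Python) =====
-- def listItem(list):
--     l = ''
--     for index, item in enumerate(list):
--         l += str(item)
--         if (index < len(list)-2):
--             l += ', '
--         elif (index == len(list)-2):
--             l += ', and '
--
--     return l
-- ===== SOURCE B (Python) =====
-- def listItem(list):
--     parts = [str(item) for item in list]
--     if len(parts) <= 1:
--         return ''.join(parts)
--     return ', '.join(parts[:-1]) + ', and ' + parts[-1]
-- ===== Notes on version B (the rewrite author's own statement) =====
-- stated objective: idiomatic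
-- what changed: B builds the string parts once, joins all but the last with ', ' and appends ', and ' plus the last element (with 0/1-item guards), replacing A's per-index separator branching inside an accumulating loop.
import Mathlib
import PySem

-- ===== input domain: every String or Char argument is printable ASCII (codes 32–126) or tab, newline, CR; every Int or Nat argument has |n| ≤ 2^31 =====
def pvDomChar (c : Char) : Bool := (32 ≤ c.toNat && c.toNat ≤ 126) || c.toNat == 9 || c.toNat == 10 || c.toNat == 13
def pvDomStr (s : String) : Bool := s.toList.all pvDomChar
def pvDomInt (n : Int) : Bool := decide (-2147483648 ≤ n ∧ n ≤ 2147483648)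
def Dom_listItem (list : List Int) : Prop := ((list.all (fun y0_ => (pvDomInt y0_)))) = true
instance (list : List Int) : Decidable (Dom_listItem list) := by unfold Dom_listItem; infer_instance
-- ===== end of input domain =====

-- B formats the list by joining the string parts with ', ' and splicing the last element after ', and ',
-- instead of A's per-index separator branching inside a loop (objective: idiomatic; no speed claim).

-- ===== PORT A =====
-- loop body of A: l += str(item); then the index-vs-len(list)-2 separator branching
def listItemStep (n : Int) (l : String) (p : Int × Int) : String :=
  let l := l ++ PySem.Int.toStr p.2
  if p.1 < n - 2 then l ++ ", "
  else if p.1 = n - 2 then l ++ ", and " else l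

def listItem (list : List Int) : String :=
  (PySem.List.enumerate list 0).foldl (listItemStep (list.length : Int)) ""

-- ===== PORT B =====
def listItem_alt (list : List Int) : String :=
  let parts := list.map PySem.Int.toStr
  if parts.length ≤ 1 then PySem.Str.join "" parts
  else PySem.Str.join ", " (PySem.List.slice parts none (some (-1))) ++ ", and "
        ++ PySem.List.pyGetD parts (-1) ""

-- ===== PRECONDITION & SPEC =====
def Spec_listItem (list : List Int) (out : String) : Prop := out = listItem_alt list
instance (list : List Int) (out : String) : Decidable (Spec_listItem list out) := by unfold Spec_listItem; infer_instance

-- ===== CLAIM (what is proved, stated in full; the proofs are below) =====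
def Claim_equal_listItem : Prop := ∀ (list : List Int), Dom_listItem list → Spec_listItem list (listItem list)

-- ===== LEMMAS AND PROOFS =====

-- join with a separator peels its head off a nonempty tail
theorem join_cons_of_ne (sep p : List Char) (rest : List (List Char)) (h : rest ≠ []) :
    PySem.Chars.join sep (p :: rest) = p ++ sep ++ PySem.Chars.join sep rest := by
  cases rest with
  | nil => exact absurd rfl h
  | cons q t => exact PySem.Chars.join_cons_cons sep p q t

-- A's fold over the tail segment of two-or-more items starting at index s = n - (length of segment)
theorem listItem_fold_ge2 (n : Int) :
    ∀ (xs : List Int) (a b : Int) (s : Int) (acc : String),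
      s + ((xs.length : Int) + 2) = n →
      ((PySem.List.enumerate (a :: b :: xs) s).foldl (listItemStep n) acc).toList =
        acc.toList
          ++ PySem.Chars.join (", ".toList)
                (((a :: b :: xs).dropLast).map (fun z => (PySem.Int.toStr z).toList))
          ++ ", and ".toList
          ++ (PySem.Int.toStr ((b :: xs).getLast (by simp))).toList := by
  intro xs
  induction xs with
  | nil =>
    intro a b s acc hs
    simp only [PySem.List.enumerate_cons, PySem.List.enumerate_nil, List.foldl, listItemStep]
    have h1 : ¬ s < n - 2 := by simp at hs; omega
    have h2 : s = n - 2 := by simp at hs; omega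
    have h3 : ¬ s + 1 < n - 2 := by omega
    have h4 : ¬ s + 1 = n - 2 := by omega
    simp [h2, PySem.Chars.join_singleton, String.toList_append]
  | cons c xs ih =>
    intro a b s acc hs
    have h1 : s < n - 2 := by simp at hs; omega
    rw [PySem.List.enumerate_cons]
    simp only [List.foldl, listItemStep, h1, if_pos]
    rw [ih b c (s + 1) _ (by simp at hs ⊢; omega)]
    have hdl : (a :: b :: c :: xs).dropLast = a :: (b :: c :: xs).dropLast := by simp
    rw [hdl, List.map_cons, join_cons_of_ne _ _ _ (by simp)]
    simp [String.toList_append]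

theorem listItem_spec' : ∀ (list : List Int), listItem list = listItem_alt list := by
  intro list
  match list with
  | [] => decide
  | [x] =>
    apply String.toList_inj.mp
    simp [listItem, listItem_alt, listItemStep, PySem.List.enumerate_cons,
      PySem.List.enumerate_nil, PySem.Str.toList_join, PySem.Chars.join_singleton]
  | a :: b :: xs =>
    apply String.toList_inj.mp
    rw [listItem, listItem_fold_ge2 ((a :: b :: xs).length : Int) xs a b 0 "" (by simp; ring)]
    have hlen : ¬ ((a :: b :: xs).map PySem.Int.toStr).length ≤ 1 := by simp
    simp only [listItem_alt, hlen, if_neg, not_false_iff]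
    rw [PySem.List.slice_to_neg_one, PySem.List.pyGetD_neg_one _ "" (by simp)]
    simp [String.toList_append, PySem.Str.toList_join, List.map_dropLast,
      Function.comp_def]
    rw [show ((PySem.Int.toStr b :: List.map PySem.Int.toStr xs).getLast (by simp))
          = PySem.Int.toStr ((b :: xs).getLast (by simp)) from
        List.getLast_map (f := PySem.Int.toStr) (l := b :: xs) (by simp)]
    exact (PySem.Int.toList_toStr _).symm

-- ===== VERDICT (by name: the statement is the Claim_ definition above) =====
theorem listItem_spec : Claim_equal_listItem := by
  intro list _
  exact listItem_spec' list
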